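-- pv_equiv track=rewrite | github.com/michaelnmmeyer/dharma | manu/parse.py | graphemes
-- ===== SOURCE A (Python) =====
-- def graphemes(s):
-- 	while s:
-- 		if s.startswith("dh") or s.startswith("th"):
-- 			yield s[:2]
-- 			s = s[2:]
-- 		elif len(s) >= 2 and s[1] == "\N{combining ring below}":
-- 			yield s[:2]
-- 			s = s[2:]
-- 		else:
-- 			yield s[:1]
-- 			s = s[1:]
-- ===== SOURCE B (Python) =====
-- def graphemes(s):
--     # single pass with an integer index instead of repeated tail-slicing
--     i = 0
--     n = len(s)
--     while i < n:
--         if s[i] in ("d", "t") and i + 1 < n and s[i + 1] == "h":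
--             yield s[i:i + 2]
--             i += 2
--         elif i + 1 < n and s[i + 1] == "\N{combining ring below}":
--             yield s[i:i + 2]
--             i += 2
--         else:
--             yield s[i]
--             i += 1
-- ===== Notes on version B (the rewrite author's own statement) =====
-- stated objective: faster
-- what changed: B scans with an integer index and slices only the 1- or 2-char grapheme, instead of A's repeated startswith and whole-tail reslicing on every step.
import Mathlib
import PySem

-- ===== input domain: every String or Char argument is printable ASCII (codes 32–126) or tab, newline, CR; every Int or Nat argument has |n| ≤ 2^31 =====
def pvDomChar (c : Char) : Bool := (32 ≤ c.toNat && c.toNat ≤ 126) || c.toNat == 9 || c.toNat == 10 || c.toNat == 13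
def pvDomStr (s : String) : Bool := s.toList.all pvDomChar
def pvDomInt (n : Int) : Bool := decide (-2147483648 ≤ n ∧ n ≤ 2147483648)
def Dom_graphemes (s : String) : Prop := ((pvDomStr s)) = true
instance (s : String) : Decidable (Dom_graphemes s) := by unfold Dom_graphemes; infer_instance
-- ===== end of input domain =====

-- B replaces A's repeated whole-tail reslicing by a single pass with an integer index (asymptotically faster in Python).

-- ===== PORT A =====
-- A's while loop over the shrinking tail, as structural recursion on the character list.
def graphemesAuxA : List Char → List String
  | [] => []
  | [c] => [String.ofList [c]]       -- len(s) = 1: startswith and the len≥2 test both fail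
  | c1 :: c2 :: rest =>
    if (c1 = 'd' ∧ c2 = 'h') ∨ (c1 = 't' ∧ c2 = 'h') then
      String.ofList [c1, c2] :: graphemesAuxA rest
    else if c2 = '\u0325' then
      String.ofList [c1, c2] :: graphemesAuxA rest
    else
      String.ofList [c1] :: graphemesAuxA (c2 :: rest)

def graphemes (s : String) : List String := graphemesAuxA s.toList

-- ===== PORT B =====
-- B's while loop with integer index i over the fixed string (n = length); the extra
-- fuel argument (initially n) only makes the loop structurally recursive — each
-- iteration advances i by at least 1, so fuel n is never exhausted while i < n.
def graphemesAuxB (cs : List Char) (n : Nat) : Nat → Nat → List String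
  | _, 0 => []
  | i, fuel + 1 =>
    if i < n then
      let c := cs.getD i ' '
      if (c = 'd' ∨ c = 't') ∧ i + 1 < n ∧ cs.getD (i + 1) ' ' = 'h' then
        String.ofList [c, cs.getD (i + 1) ' '] :: graphemesAuxB cs n (i + 2) fuel
      else if i + 1 < n ∧ cs.getD (i + 1) ' ' = '\u0325' then
        String.ofList [c, cs.getD (i + 1) ' '] :: graphemesAuxB cs n (i + 2) fuel
      else
        String.ofList [c] :: graphemesAuxB cs n (i + 1) fuel
    else []

def graphemes_alt (s : String) : List String :=
  graphemesAuxB s.toList s.toList.length 0 s.toList.length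

-- ===== PRECONDITION & SPEC =====
def Spec_graphemes (s : String) (out : List String) : Prop := out = graphemes_alt s
instance (s : String) (out : List String) : Decidable (Spec_graphemes s out) := by unfold Spec_graphemes; infer_instance

-- ===== CLAIM (what is proved, stated in full; the proofs are below) =====
def Claim_equal_graphemes : Prop := ∀ (s : String), Dom_graphemes s → Spec_graphemes s (graphemes s)

-- ===== LEMMAS AND PROOFS =====

theorem graphemesAux_agree (k : Nat) : ∀ (cs : List Char) (i : Nat),
    cs.length - i ≤ k → graphemesAuxB cs cs.length i k = graphemesAuxA (cs.drop i) := by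
  induction k with
  | zero =>
    intro cs i h
    have hge : cs.length ≤ i := by omega
    rw [List.drop_eq_nil_of_le hge]
    simp [graphemesAuxB, graphemesAuxA]
  | succ k ih =>
    intro cs i h
    by_cases hi : i < cs.length
    · have hget : cs.getD i ' ' = cs[i] := List.getD_eq_getElem cs ' ' hi
      have hdrop : cs.drop i = cs[i] :: cs.drop (i + 1) :=
        List.drop_eq_getElem_cons hi
      by_cases hi1 : i + 1 < cs.length
      · have hget1 : cs.getD (i + 1) ' ' = cs[i + 1] := List.getD_eq_getElem cs ' ' hi1
        have hdrop1 : cs.drop (i + 1) = cs[i + 1] :: cs.drop (i + 2) :=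
          List.drop_eq_getElem_cons hi1
        rw [graphemesAuxB, if_pos hi]
        simp only [hget, hget1]
        rw [hdrop, hdrop1]
        by_cases h1 : (cs[i] = 'd' ∨ cs[i] = 't') ∧ i + 1 < cs.length ∧ cs[i + 1] = 'h'
        · rw [if_pos h1]
          have hA : (cs[i] = 'd' ∧ cs[i+1] = 'h') ∨ (cs[i] = 't' ∧ cs[i+1] = 'h') := by
            rcases h1 with ⟨hd, _, hh⟩
            rcases hd with hd | hd
            · exact Or.inl ⟨hd, hh⟩
            · exact Or.inr ⟨hd, hh⟩
          rw [graphemesAuxA, if_pos hA]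
          rw [ih cs (i + 2) (by omega)]
        · rw [if_neg h1]
          have hA : ¬ ((cs[i] = 'd' ∧ cs[i+1] = 'h') ∨ (cs[i] = 't' ∧ cs[i+1] = 'h')) := by
            intro hc
            apply h1
            rcases hc with ⟨hd, hh⟩ | ⟨hd, hh⟩
            · exact ⟨Or.inl hd, hi1, hh⟩
            · exact ⟨Or.inr hd, hi1, hh⟩
          rw [graphemesAuxA, if_neg hA]
          by_cases h2 : cs[i + 1] = '\u0325'
          · rw [if_pos ⟨hi1, h2⟩, if_pos h2]
            rw [ih cs (i + 2) (by omega)]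
          · rw [if_neg (by intro hc; exact h2 hc.2), if_neg h2]
            rw [ih cs (i + 1) (by omega), hdrop1]
      · -- i is the last index: both 2-char branches fail, the loop ends after this step
        have hdrop1 : cs.drop (i + 1) = [] := List.drop_eq_nil_of_le (by omega)
        rw [graphemesAuxB, if_pos hi]
        simp only [hget]
        rw [if_neg (by intro hc; exact absurd hc.2.1 hi1),
            if_neg (by intro hc; exact absurd hc.1 hi1)]
        rw [hdrop, hdrop1, graphemesAuxA]
        cases k with
        | zero => rw [graphemesAuxB]
        | succ k' => rw [graphemesAuxB, if_neg (by omega)]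
    · have hge : cs.length ≤ i := by omega
      rw [List.drop_eq_nil_of_le hge, graphemesAuxB, if_neg hi]
      rfl

-- ===== VERDICT (by name: the statement is the Claim_ definition above) =====
theorem graphemes_spec : Claim_equal_graphemes := by
  intro s _
  unfold Spec_graphemes graphemes graphemes_alt
  rw [graphemesAux_agree s.toList.length s.toList 0 (by omega)]
  simp
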